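-- pv_equiv track=rewrite | github.com/brioja/langrisser_heroes | calculate_total_heroes.py | calculate_total_heroes
-- ===== SOURCE A (Python) =====
-- def calculate_total_heroes(squads, heroes_data):
--     total_heroes = 0
--     for squad, factions in squads.items():
--         heroes_set = set()
--         for hero, hero_factions in heroes_data.items():
--             if any(faction in factions for faction in hero_factions):
--                 heroes_set.add(hero)
--         total_heroes += len(heroes_set)
--     return total_heroes
-- ===== SOURCE B (Python) =====
-- def calculate_total_heroes(squads, heroes_data):
--     # Inverted index: faction -> set of heroes having that faction.
--     index = {}
--     for hero, hero_factions in heroes_data.items():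
--         for faction in hero_factions:
--             index.setdefault(faction, set()).add(hero)
--     total = 0
--     for squad, factions in squads.items():
--         matched = set()
--         for faction in factions:
--             matched |= index.get(faction, set())
--         total += len(matched)
--     return total
-- ===== Notes on version B (the rewrite author's own statement) =====
-- stated objective: faster
-- what changed: Builds a faction->heroes inverted index once, then each squad's count is the size of the union of the index entries for its factions, replacing the per-squad scan over every hero and faction.
import Mathlib
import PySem

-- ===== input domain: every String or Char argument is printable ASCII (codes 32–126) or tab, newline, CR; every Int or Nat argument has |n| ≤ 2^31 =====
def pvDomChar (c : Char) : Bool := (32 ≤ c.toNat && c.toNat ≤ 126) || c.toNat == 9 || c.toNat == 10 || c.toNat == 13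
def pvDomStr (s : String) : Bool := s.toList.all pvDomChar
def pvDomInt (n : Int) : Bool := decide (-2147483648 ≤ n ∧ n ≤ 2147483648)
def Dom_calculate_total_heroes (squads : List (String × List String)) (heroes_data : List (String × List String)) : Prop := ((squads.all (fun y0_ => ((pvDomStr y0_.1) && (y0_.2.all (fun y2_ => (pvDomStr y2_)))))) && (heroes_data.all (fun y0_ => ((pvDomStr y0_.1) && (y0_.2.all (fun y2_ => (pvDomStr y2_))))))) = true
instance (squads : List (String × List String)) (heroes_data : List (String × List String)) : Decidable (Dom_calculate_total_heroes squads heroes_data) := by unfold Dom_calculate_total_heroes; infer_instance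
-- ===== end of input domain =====

-- B replaces A's per-squad scan over all heroes with a precomputed faction->heroes inverted
-- index and takes per-squad unions (objective: faster; equal return value proved below).


-- ===== PORT A =====
def calculate_total_heroes (squads : List (String × List String)) (heroes_data : List (String × List String)) : Int :=
  squads.foldl
    (fun total_heroes p =>
      let factions := p.2
      let heroes_set : PySem.Set String :=
        heroes_data.foldl
          (fun s q =>
            if q.2.any (fun faction => factions.contains faction) then PySem.Set.add s q.1 else s)
          PySem.Set.empty
      total_heroes + (heroes_set.length : Int))
    0

-- ===== PORT B =====
-- index.setdefault(faction, set()).add(hero)  =  modify faction (default empty set) (add hero)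
def pvBuildIndex (heroes_data : List (String × List String)) : PySem.Dict String (PySem.Set String) :=
  heroes_data.foldl
    (fun d q => q.2.foldl (fun d faction => d.modify faction PySem.Set.empty (fun s => PySem.Set.add s q.1)) d)
    PySem.Dict.empty

def calculate_total_heroes_alt (squads : List (String × List String)) (heroes_data : List (String × List String)) : Int :=
  let index := pvBuildIndex heroes_data
  squads.foldl
    (fun total p =>
      let matched : PySem.Set String :=
        p.2.foldl (fun m faction => PySem.Set.union m (index.getD faction PySem.Set.empty)) PySem.Set.empty
      total + (matched.length : Int))
    0

-- ===== PRECONDITION & SPEC =====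
def Spec_calculate_total_heroes (squads : List (String × List String)) (heroes_data : List (String × List String)) (out : Int) : Prop := out = calculate_total_heroes_alt squads heroes_data
instance (squads : List (String × List String)) (heroes_data : List (String × List String)) (out : Int) : Decidable (Spec_calculate_total_heroes squads heroes_data out) := by unfold Spec_calculate_total_heroes; infer_instance

-- ===== CLAIM (what is proved, stated in full; the proofs are below) =====
def Claim_equal_calculate_total_heroes : Prop := ∀ (squads : List (String × List String)) (heroes_data : List (String × List String)), Dom_calculate_total_heroes squads heroes_data → Spec_calculate_total_heroes squads heroes_data (calculate_total_heroes squads heroes_data)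

-- ===== LEMMAS AND PROOFS =====

-- A's inner loop: membership in the accumulated hero set
theorem mem_aset (heroes_data : List (String × List String)) (F : List String)
    (s : PySem.Set String) (x : String) :
    x ∈ heroes_data.foldl
        (fun s q => if q.2.any (fun f => F.contains f) then PySem.Set.add s q.1 else s) s
      ↔ x ∈ s ∨ ∃ q ∈ heroes_data, q.1 = x ∧ q.2.any (fun f => F.contains f) := by
  induction heroes_data generalizing s with
  | nil => simp
  | cons q rest ih =>
    simp only [List.foldl_cons, ih]
    by_cases h : q.2.any (fun f => F.contains f) <;>
      simp only [h] <;> aesop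

theorem nodup_aset (heroes_data : List (String × List String)) (F : List String)
    (s : PySem.Set String) (hs : s.Nodup) :
    (heroes_data.foldl
      (fun s q => if q.2.any (fun f => F.contains f) then PySem.Set.add s q.1 else s) s).Nodup := by
  induction heroes_data generalizing s with
  | nil => simpa
  | cons q rest ih =>
    simp only [List.foldl_cons]
    split
    · exact ih _ (PySem.Set.nodup_add _ _ hs)
    · exact ih _ hs

-- B's index, inner loop over one hero's faction list
theorem mem_getD_inner (fs : List String) (hero : String)
    (d : PySem.Dict String (PySem.Set String)) (f x : String) :
    x ∈ (fs.foldl (fun d fac => d.modify fac PySem.Set.empty (fun s => PySem.Set.add s hero)) d).getD f PySem.Set.empty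
      ↔ x ∈ d.getD f PySem.Set.empty ∨ (f ∈ fs ∧ x = hero) := by
  induction fs generalizing d with
  | nil => simp
  | cons g rest ih =>
    simp only [List.foldl_cons, ih, PySem.Dict.getD_modify]
    by_cases hfg : f = g <;> (simp [hfg, PySem.Set.mem_add]; try aesop)

-- B's index: membership in an entry
theorem mem_index (heroes_data : List (String × List String)) (f x : String) :
    x ∈ (pvBuildIndex heroes_data).getD f PySem.Set.empty
      ↔ ∃ q ∈ heroes_data, q.1 = x ∧ f ∈ q.2 := by
  suffices h : ∀ d : PySem.Dict String (PySem.Set String),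
      x ∈ (heroes_data.foldl
            (fun d q => q.2.foldl (fun d fac => d.modify fac PySem.Set.empty (fun s => PySem.Set.add s q.1)) d) d).getD f PySem.Set.empty
        ↔ x ∈ d.getD f PySem.Set.empty ∨ ∃ q ∈ heroes_data, q.1 = x ∧ f ∈ q.2 by
    simpa [pvBuildIndex] using h PySem.Dict.empty
  induction heroes_data with
  | nil => simp
  | cons q rest ih =>
    intro d
    simp only [List.foldl_cons, ih, mem_getD_inner]
    aesop

-- B's per-squad union: membership
theorem mem_bset (F : List String) (idx : PySem.Dict String (PySem.Set String))
    (m : PySem.Set String) (x : String) :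
    x ∈ F.foldl (fun m fac => PySem.Set.union m (idx.getD fac PySem.Set.empty)) m
      ↔ x ∈ m ∨ ∃ f ∈ F, x ∈ idx.getD f PySem.Set.empty := by
  induction F generalizing m with
  | nil => simp
  | cons g rest ih =>
    simp only [List.foldl_cons, ih, PySem.Set.mem_union]
    aesop

theorem nodup_bset (F : List String) (idx : PySem.Dict String (PySem.Set String))
    (m : PySem.Set String) (hm : m.Nodup) :
    (F.foldl (fun m fac => PySem.Set.union m (idx.getD fac PySem.Set.empty)) m).Nodup := by
  induction F generalizing m with
  | nil => simpa
  | cons g rest ih => exact ih _ (PySem.Set.nodup_union _ _ hm)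

-- per-squad counts agree
theorem squad_count_eq (heroes_data : List (String × List String)) (F : List String) :
    (heroes_data.foldl
      (fun s q => if q.2.any (fun f => F.contains f) then PySem.Set.add s q.1 else s)
      PySem.Set.empty).length
    = (F.foldl (fun m fac => PySem.Set.union m ((pvBuildIndex heroes_data).getD fac PySem.Set.empty))
        PySem.Set.empty).length := by
  apply List.Perm.length_eq
  rw [List.perm_ext_iff_of_nodup
    (nodup_aset heroes_data F _ (by simp [PySem.Set.empty]))
    (nodup_bset F _ _ (by simp [PySem.Set.empty]))]
  intro x
  rw [mem_aset, mem_bset]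
  simp only [mem_index]
  simp only [PySem.Set.empty, List.not_mem_nil, false_or, List.any_eq_true,
    List.contains_eq_mem, decide_eq_true_eq]
  constructor
  · rintro ⟨q, hq, rfl, f, hf, hfF⟩; exact ⟨f, hfF, q, hq, rfl, hf⟩
  · rintro ⟨f, hfF, q, hq, rfl, hf⟩; exact ⟨q, hq, rfl, f, hf, hfF⟩

-- ===== VERDICT (by name: the statement is the Claim_ definition above) =====
theorem calculate_total_heroes_spec : Claim_equal_calculate_total_heroes := by
  intro squads heroes_data _
  unfold Spec_calculate_total_heroes calculate_total_heroes calculate_total_heroes_alt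
  apply PySem.List.foldl_congr_mem
  intro total p _
  simp only []
  rw [squad_count_eq heroes_data p.2]
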